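-- pv_equiv track=rewrite | github.com/saimsheikh123/Smart-Car-Alert-Model | Audio_Models/multi_model_api.py | analyze_correction_patterns
-- ===== SOURCE A (Python) =====
-- SOUND_CLASSES = {
--     "alert_sounds": "Alert Sounds",
--     "collision_sounds": "Collision/Impact",
--     "human_scream": "Human Scream",
--     "road_traffic": "Road Traffic",
--     "other": "Other/Unsure"
-- }
--
-- def analyze_correction_patterns(corrections: list) -> str:
--     """Analyze patterns in corrections and provide recommendations."""
--     if len(corrections) < 5:
--         return "Collect more corrections (at least 5) to identify patterns"
--
--     # Find the most misclassified sound type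
--     from collections import Counter
--     actual_sounds = Counter(c["actual"] for c in corrections)
--     most_misclassified = actual_sounds.most_common(1)[0][0]
--
--     # Find common false predictions for most misclassified
--     wrong_for_sound = [
--         c["predicted"]
--         for c in corrections
--         if c["actual"] == most_misclassified and c["predicted"] != c["actual"] and c["predicted"]
--     ]
--
--     if wrong_for_sound:
--         most_wrong = Counter(wrong_for_sound).most_common(1)[0][0]
--         return f"PATTERN: '{SOUND_CLASSES.get(most_misclassified, most_misclassified)}' is frequently confused with '{SOUND_CLASSES.get(most_wrong, most_wrong)}'. Consider retraining with this distinction highlighted."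
--
--     return "Monitor more corrections to identify patterns"
-- ===== SOURCE B (Python) =====
-- SOUND_CLASSES = {
--     "alert_sounds": "Alert Sounds",
--     "collision_sounds": "Collision/Impact",
--     "human_scream": "Human Scream",
--     "road_traffic": "Road Traffic",
--     "other": "Other/Unsure"
-- }
--
-- def analyze_correction_patterns(corrections: list) -> str:
--     """Analyze patterns in corrections and provide recommendations."""
--     if len(corrections) < 5:
--         return "Collect more corrections (at least 5) to identify patterns"
--
--     from collections import Counter, defaultdict
--     # ONE pass: count actuals and, per actual, count its wrong non-empty predictions.
--     actual_counts = Counter()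
--     confusions = defaultdict(Counter)
--     for c in corrections:
--         actual = c["actual"]
--         predicted = c["predicted"]
--         actual_counts[actual] += 1
--         if predicted != actual and predicted:
--             confusions[actual][predicted] += 1
--
--     most_misclassified = actual_counts.most_common(1)[0][0]
--     wrong = confusions[most_misclassified]
--     if wrong:
--         most_wrong = wrong.most_common(1)[0][0]
--         return f"PATTERN: '{SOUND_CLASSES.get(most_misclassified, most_misclassified)}' is frequently confused with '{SOUND_CLASSES.get(most_wrong, most_wrong)}'. Consider retraining with this distinction highlighted."
--
--     return "Monitor more corrections to identify patterns"
-- ===== Notes on version B (the rewrite author's own statement) =====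
-- stated objective: alternative
-- what changed: Replaces A's two-phase scheme (count all actuals, then re-scan the whole list filtering wrong predictions for the winner) with a single pass that simultaneously builds the actual-Counter and a per-actual confusion Counter dict, so the second scan over corrections disappears.
import Mathlib
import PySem

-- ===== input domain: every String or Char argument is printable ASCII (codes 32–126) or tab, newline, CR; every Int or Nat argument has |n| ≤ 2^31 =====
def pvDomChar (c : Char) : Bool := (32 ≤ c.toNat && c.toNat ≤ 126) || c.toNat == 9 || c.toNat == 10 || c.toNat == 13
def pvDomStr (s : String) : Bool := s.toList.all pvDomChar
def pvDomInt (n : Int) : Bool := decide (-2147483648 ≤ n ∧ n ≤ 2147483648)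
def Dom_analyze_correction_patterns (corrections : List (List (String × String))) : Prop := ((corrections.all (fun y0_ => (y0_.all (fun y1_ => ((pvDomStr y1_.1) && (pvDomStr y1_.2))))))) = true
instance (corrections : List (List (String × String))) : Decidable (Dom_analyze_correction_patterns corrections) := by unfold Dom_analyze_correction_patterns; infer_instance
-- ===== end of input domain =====

-- B replaces A's two passes over `corrections` (count actuals, then re-scan for the winner's wrong
-- predictions) by ONE pass building both the actual-Counter and a per-actual confusion-Counter dict
-- (objective: alternative decomposition, same asymptotic cost).

-- shared primitives of both ports ------------------------------------------------
-- c["k"]: first-match association-list lookup; Pre_ guarantees the key is present,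
-- so the "" default is never consulted on admitted inputs (Python raises KeyError there).
def pvLookup (c : List (String × String)) (k : String) : String :=
  ((PySem.Dict.mk c).get? k).getD ""

-- SOUND_CLASSES.get(s, s) for the fixed module-level dict literal
def soundClass (s : String) : String :=
  if s = "alert_sounds" then "Alert Sounds"
  else if s = "collision_sounds" then "Collision/Impact"
  else if s = "human_scream" then "Human Scream"
  else if s = "road_traffic" then "Road Traffic"
  else if s = "other" then "Other/Unsure"
  else s

-- Counter.most_common(1)[0][0] on a nonempty counter: the FIRST key (insertion order)
-- with maximal count; "" on the empty counter (Python raises IndexError there — both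
-- programs only call it on nonempty counters).
def mostCommon1 (d : PySem.Dict String Int) : String :=
  match d.items with
  | [] => ""
  | p :: rest => (rest.foldl (fun b q => if q.2 > b.2 then q else b) p).1

-- ===== PORT A =====
-- the comprehension's condition: c["actual"] == m and c["predicted"] != c["actual"] and c["predicted"]
def pvWrongCond (m : String) (c : List (String × String)) : Bool :=
  pvLookup c "actual" == m && (pvLookup c "predicted" != pvLookup c "actual" && pvLookup c "predicted" != "")

def analyze_correction_patterns (corrections : List (List (String × String))) : String :=
  if corrections.length < 5 then "Collect more corrections (at least 5) to identify patterns"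
  else
    let actual_sounds := PySem.Dict.counter (corrections.map (fun c => pvLookup c "actual"))
    let most_misclassified := mostCommon1 actual_sounds
    let wrong_for_sound := (corrections.filter (pvWrongCond most_misclassified)).map (fun c => pvLookup c "predicted")
    if wrong_for_sound ≠ [] then
      "PATTERN: '" ++ soundClass most_misclassified ++ "' is frequently confused with '"
        ++ soundClass (mostCommon1 (PySem.Dict.counter wrong_for_sound))
        ++ "'. Consider retraining with this distinction highlighted."
    else "Monitor more corrections to identify patterns"

-- ===== PORT B =====
-- the single loop body: increment the actual count; on a wrong non-empty prediction,
-- increment confusions[actual][predicted]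
def pvStepB (st : PySem.Dict String Int × PySem.Dict String (PySem.Dict String Int))
    (c : List (String × String)) :
    PySem.Dict String Int × PySem.Dict String (PySem.Dict String Int) :=
  let actual := pvLookup c "actual"
  let predicted := pvLookup c "predicted"
  (st.1.modify actual 0 (· + 1),
   if predicted != actual && predicted != "" then
     st.2.modify actual PySem.Dict.empty (fun inner => inner.modify predicted 0 (· + 1))
   else st.2)

def analyze_correction_patterns_alt (corrections : List (List (String × String))) : String :=
  if corrections.length < 5 then "Collect more corrections (at least 5) to identify patterns"
  else
    let st := corrections.foldl pvStepB (PySem.Dict.empty, PySem.Dict.empty)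
    let most_misclassified := mostCommon1 st.1
    let wrong := st.2.getD most_misclassified PySem.Dict.empty
    if wrong.items ≠ [] then
      "PATTERN: '" ++ soundClass most_misclassified ++ "' is frequently confused with '"
        ++ soundClass (mostCommon1 wrong)
        ++ "'. Consider retraining with this distinction highlighted."
    else "Monitor more corrections to identify patterns"

-- ===== PRECONDITION & SPEC =====
-- Python A raises KeyError on a correction dict missing "actual" (or missing "predicted" on a
-- correction whose actual is the most-misclassified winner) once len(corrections) ≥ 5. Which
-- corrections need "predicted" depends on the counting, so Pre_ is slightly narrower than exact:
-- it requires BOTH keys on every correction whenever length ≥ 5 (see claim.json "cites").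
def Pre_analyze_correction_patterns (corrections : List (List (String × String))) : Prop :=
  corrections.length < 5 ∨
    ∀ c ∈ corrections,
      (PySem.Dict.mk c).contains "actual" = true ∧ (PySem.Dict.mk c).contains "predicted" = true
instance (corrections : List (List (String × String))) : Decidable (Pre_analyze_correction_patterns corrections) := by unfold Pre_analyze_correction_patterns; infer_instance

def pvWitness_analyze_correction_patterns : (List (List (String × String))) :=
  [[("actual", "alert_sounds"), ("predicted", "road_traffic")],
   [("actual", "alert_sounds"), ("predicted", "road_traffic")],
   [("actual", "alert_sounds"), ("predicted", "other")],
   [("actual", "road_traffic"), ("predicted", "road_traffic")],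
   [("actual", "other"), ("predicted", "")]]

def Spec_analyze_correction_patterns (corrections : List (List (String × String))) (out : String) : Prop := out = analyze_correction_patterns_alt corrections
instance (corrections : List (List (String × String))) (out : String) : Decidable (Spec_analyze_correction_patterns corrections out) := by unfold Spec_analyze_correction_patterns; infer_instance

-- ===== CLAIM (what is proved, stated in full; the proofs are below) =====
def Claim_equal_analyze_correction_patterns : Prop := ∀ (corrections : List (List (String × String))), Dom_analyze_correction_patterns corrections → Pre_analyze_correction_patterns corrections → Spec_analyze_correction_patterns corrections (analyze_correction_patterns corrections)

-- ===== LEMMAS AND PROOFS =====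

-- first component of B's one-pass fold = A's Counter of actuals (over any suffix, any start state)
lemma pvStepB_fst (l : List (List (String × String)))
    (s : PySem.Dict String Int × PySem.Dict String (PySem.Dict String Int)) :
    (l.foldl pvStepB s).1
      = (l.map (fun c => pvLookup c "actual")).foldl (fun d x => d.modify x 0 (· + 1)) s.1 := by
  induction l generalizing s with
  | nil => rfl
  | cons c t ih => simp only [List.foldl_cons, List.map_cons, ih, pvStepB]

-- the winner's slot of B's confusion dict = the modify-loop over A's filtered corrections
lemma pvStepB_snd (m : String) (l : List (List (String × String)))
    (s : PySem.Dict String Int × PySem.Dict String (PySem.Dict String Int)) :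
    ((l.foldl pvStepB s).2).getD m PySem.Dict.empty
      = (l.filter (pvWrongCond m)).foldl
          (fun inner c => inner.modify (pvLookup c "predicted") 0 (· + 1))
          (s.2.getD m PySem.Dict.empty) := by
  induction l generalizing s with
  | nil => rfl
  | cons c t ih =>
    simp only [List.foldl_cons, List.filter_cons]
    by_cases hp1 : pvLookup c "predicted" = pvLookup c "actual"
    · have hc : pvWrongCond m c = false := by simp [pvWrongCond, hp1]
      simp [pvStepB, hp1, hc, ih]

    · by_cases hp2 : pvLookup c "predicted" = ""
      · have hc : pvWrongCond m c = false := by simp [pvWrongCond, hp2]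
        simp [pvStepB, hp2, hc, ih]
      · by_cases hmc : pvLookup c "actual" = m
        · have hpm : ¬ pvLookup c "predicted" = m := hmc ▸ hp1
          have hc : pvWrongCond m c = true := by simp [pvWrongCond, hmc, hpm, hp2]
          simp [pvStepB, hp2, hc, ih, hmc, hpm]
        · have hcm : ¬ m = pvLookup c "actual" := fun h => hmc h.symm
          have hc : pvWrongCond m c = false := by simp [pvWrongCond, hmc]
          simp [pvStepB, hp1, hp2, hc, ih, PySem.Dict.getD_modify, hcm]

-- counter xs has an empty items list exactly when xs is empty
lemma counter_items_nil_iff (xs : List String) :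
    (PySem.Dict.counter xs (κ := String)).items = [] ↔ xs = [] := by
  cases xs with
  | nil => exact ⟨fun _ => rfl, fun _ => rfl⟩
  | cons x t =>
    constructor
    · intro h
      have := PySem.Dict.items_counter (xs := x :: t)
      rw [h] at this
      simp [PySem.Set.ofList_cons] at this
    · intro h; cases h

-- ===== VERDICT (by name: the statement is the Claim_ definition above) =====
theorem analyze_correction_patterns_spec : Claim_equal_analyze_correction_patterns := by
  intro cs _hdom _hpre
  unfold Spec_analyze_correction_patterns
  unfold analyze_correction_patterns analyze_correction_patterns_alt
  by_cases h5 : cs.length < 5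
  · simp [h5]
  · simp only [if_neg h5]
    have h1 : (cs.foldl pvStepB (PySem.Dict.empty, PySem.Dict.empty)).1
        = PySem.Dict.counter (cs.map (fun c => pvLookup c "actual")) := by
      rw [pvStepB_fst, PySem.Dict.counter_eq_foldl]
    set m := mostCommon1 (PySem.Dict.counter (cs.map (fun c => pvLookup c "actual"))) with hm
    have h2 : ((cs.foldl pvStepB (PySem.Dict.empty, PySem.Dict.empty)).2).getD m PySem.Dict.empty
        = PySem.Dict.counter ((cs.filter (pvWrongCond m)).map (fun c => pvLookup c "predicted")) := by
      rw [pvStepB_snd, PySem.Dict.counter_eq_foldl, List.foldl_map]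
      rfl
    simp only [h1, h2, ← hm]
    by_cases hw : (cs.filter (pvWrongCond m)).map (fun c => pvLookup c "predicted") = []
    · simp [hw, counter_items_nil_iff]
    · simp [hw, counter_items_nil_iff]
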